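-- pv_equiv track=rewrite | github.com/algo-gogo/yujin_cote | 이진탐색/가사 검색.py | find_wildcard_end
-- ===== SOURCE A (Python) =====
-- def find_wildcard_end(word, start, end, last=-1):
--     mid = (start + end) // 2
--
--     if( start>end ):
--         return last
--     elif( word[mid] == "?" ):
--         last = mid
--         return find_wildcard_end(word, mid+1, end, last)
--     else:
--         return find_wildcard_end(word, start, mid-1, last)
-- ===== SOURCE B (Python) =====
-- def find_wildcard_end(word, start, end, last=-1):
--     while start <= end:
--         mid = (start + end) // 2
--         if word[mid] == "?":
--             last = mid
--             start = mid + 1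
--         else:
--             end = mid - 1
--     return last
-- ===== Notes on version B (the rewrite author's own statement) =====
-- stated objective: idiomatic
-- what changed: Replaced the tail recursion with an iterative while-loop that mutates start/end/last in place, the way binary search is normally written in Python.
-- outside the precondition, e.g. on find_wildcard_end('?ab', 0, 5, -1): A returns 0, B returns 0
import Mathlib
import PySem

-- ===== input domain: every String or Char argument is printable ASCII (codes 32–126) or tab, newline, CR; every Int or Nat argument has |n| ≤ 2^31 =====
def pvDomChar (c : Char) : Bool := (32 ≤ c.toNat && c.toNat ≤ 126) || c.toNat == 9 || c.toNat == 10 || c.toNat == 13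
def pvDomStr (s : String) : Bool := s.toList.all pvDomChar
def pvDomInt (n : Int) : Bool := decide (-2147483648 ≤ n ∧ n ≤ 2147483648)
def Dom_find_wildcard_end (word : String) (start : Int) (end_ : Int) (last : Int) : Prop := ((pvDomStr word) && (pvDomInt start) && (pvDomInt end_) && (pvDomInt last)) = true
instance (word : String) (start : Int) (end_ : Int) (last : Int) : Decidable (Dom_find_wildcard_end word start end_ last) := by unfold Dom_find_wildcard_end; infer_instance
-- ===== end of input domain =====

-- B rewrites A's tail-recursive binary search as the idiomatic iterative while-loop; return value only, same results.


-- ===== PORT A =====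
-- A: tail-recursive binary search for the last index holding '?'.
-- word[mid] == "?" is PySem.Str.pyGet? = some '?'; where Python raises IndexError
-- (pyGet? = none) the equality is false and the port takes the else branch — such
-- inputs are excluded by Pre_.
def find_wildcard_end (word : String) (start : Int) (end_ : Int) (last : Int) : Int :=
  let mid := PySem.Int.floordiv (start + end_) 2
  if start > end_ then last
  else if PySem.Str.pyGet? word mid = some '?' then
    find_wildcard_end word (mid + 1) end_ mid
  else
    find_wildcard_end word start (mid - 1) last
termination_by (end_ + 1 - start).toNat
decreasing_by
  all_goals
    have _h := PySem.Int.floordiv_two_mid_bounds (lo := start) (hi := end_) (by omega)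
    omega

-- ===== PORT B =====
-- B: the while-loop; loop state (start, end_, last) carried by the tail-call of fweLoop.
def fweLoop (word : String) (start : Int) (end_ : Int) (last : Int) : Int :=
  if h : start ≤ end_ then
    let mid := PySem.Int.floordiv (start + end_) 2
    match PySem.Str.pyGet? word mid with
    | some c => if c = '?' then fweLoop word (mid + 1) end_ mid
                else fweLoop word start (mid - 1) last
    | none => fweLoop word start (mid - 1) last   -- IndexError in Python; excluded by Pre_
  else last
termination_by (end_ + 1 - start).toNat
decreasing_by
  all_goals
    have hb := PySem.Int.floordiv_two_mid_bounds (lo := start) (hi := end_) h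
    omega

def find_wildcard_end_alt (word : String) (start : Int) (end_ : Int) (last : Int) : Int :=
  fweLoop word start end_ last

-- ===== PRECONDITION & SPEC =====
-- Pre_ admits the empty range (no index is read) or a range entirely inside Python's
-- valid index range for word. On a nonempty range that is only partly in bounds A may
-- raise IndexError or may return depending on where '?'s lie in word, which is not a
-- closed-form condition on the input; such inputs are excluded even though A returns
-- on some of them (B behaves identically there, returning or raising exactly as A does).
def Pre_find_wildcard_end (word : String) (start : Int) (end_ : Int) (_last : Int) : Prop :=
  start > end_ ∨ (-(word.toList.length : Int) ≤ start ∧ end_ < (word.toList.length : Int))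
instance (word : String) (start : Int) (end_ : Int) (last : Int) : Decidable (Pre_find_wildcard_end word start end_ last) := by unfold Pre_find_wildcard_end; infer_instance

def pvWitness_find_wildcard_end : String × Int × Int × Int := ("??a", 0, 2, -1)

def Spec_find_wildcard_end (word : String) (start : Int) (end_ : Int) (last : Int) (out : Int) : Prop := out = find_wildcard_end_alt word start end_ last
instance (word : String) (start : Int) (end_ : Int) (last : Int) (out : Int) : Decidable (Spec_find_wildcard_end word start end_ last out) := by unfold Spec_find_wildcard_end; infer_instance

-- ===== CLAIM (what is proved, stated in full; the proofs are below) =====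
def Claim_equal_find_wildcard_end : Prop := ∀ (word : String) (start : Int) (end_ : Int) (last : Int), Dom_find_wildcard_end word start end_ last → Pre_find_wildcard_end word start end_ last → Spec_find_wildcard_end word start end_ last (find_wildcard_end word start end_ last)

-- ===== LEMMAS AND PROOFS =====

-- A's recursion and B's loop agree on every input (Pre_ is not needed: where Python
-- would raise, both ports take the same else branch).
theorem fwe_eq_loop (word : String) (start end_ last : Int) :
    find_wildcard_end word start end_ last = fweLoop word start end_ last := by
  fun_induction find_wildcard_end word start end_ last with
  | case1 start end_ last hgt =>
      rw [fweLoop]; simp [show ¬ start ≤ end_ by omega]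
  | case2 start end_ last mid hngt hq ih =>
      rw [fweLoop]
      simp only [show start ≤ end_ by omega, dif_pos]
      rw [hq]
      exact ih
  | case3 start end_ last mid hngt hq ih =>
      rw [fweLoop]
      simp only [show start ≤ end_ by omega, dif_pos]
      cases hg : PySem.Str.pyGet? word mid with
      | none => exact ih
      | some c =>
          have hc : ¬ c = '?' := by intro h; exact hq (by rw [hg, h])
          simp only [if_neg hc]
          exact ih

-- ===== VERDICT (by name: the statement is the Claim_ definition above) =====
theorem find_wildcard_end_spec : Claim_equal_find_wildcard_end := by
  intro word start end_ last _ _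
  unfold Spec_find_wildcard_end find_wildcard_end_alt
  exact fwe_eq_loop word start end_ last
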